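-- pv_equiv track=rewrite | github.com/tmfs10/bb-opt | src/non_matplotlib_utils.py | make_contiguous_idx
-- ===== SOURCE A (Python) =====
-- def make_contiguous_idx(idx_list):
--     idx_to_new_map = {}
--     new_to_idx_map = []
--     new_idx_list = []
--     for idx in idx_list:
--         if idx not in idx_to_new_map:
--             idx_to_new_map[idx] = len(idx_to_new_map)
--             new_to_idx_map += [idx]
--         new_idx_list += [idx_to_new_map[idx]]
--     return new_idx_list, idx_to_new_map, new_to_idx_map
-- ===== SOURCE B (Python) =====
-- def make_contiguous_idx(idx_list):
--     new_to_idx_map = list(dict.fromkeys(idx_list))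
--     idx_to_new_map = {v: i for i, v in enumerate(new_to_idx_map)}
--     new_idx_list = [idx_to_new_map[x] for x in idx_list]
--     return new_idx_list, idx_to_new_map, new_to_idx_map
-- ===== Notes on version B (the rewrite author's own statement) =====
-- stated objective: idiomatic
-- what changed: Replaces the single interleaved loop (membership test, dict growth and output append per element) by three separate passes: dedup via dict.fromkeys, an enumerate-comprehension for the value-to-index dict, and a plain map over the input.
import Mathlib
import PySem

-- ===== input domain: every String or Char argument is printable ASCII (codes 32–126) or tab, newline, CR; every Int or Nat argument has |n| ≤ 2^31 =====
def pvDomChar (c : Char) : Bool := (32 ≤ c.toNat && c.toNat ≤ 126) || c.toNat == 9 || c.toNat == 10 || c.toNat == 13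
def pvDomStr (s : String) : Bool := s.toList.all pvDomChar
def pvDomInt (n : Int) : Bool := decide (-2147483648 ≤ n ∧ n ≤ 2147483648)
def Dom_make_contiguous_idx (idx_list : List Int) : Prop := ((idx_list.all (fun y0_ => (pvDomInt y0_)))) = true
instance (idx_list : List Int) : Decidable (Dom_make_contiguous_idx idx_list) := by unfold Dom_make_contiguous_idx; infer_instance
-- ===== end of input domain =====

-- B replaces A's single interleaved loop by three separate passes (dedup, enumerate-dict, map); same cost, more idiomatic.

-- ===== PORT A =====
-- state: (idx_to_new_map, new_to_idx_map, new_idx_list)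
def make_contiguous_idx (idx_list : List Int) : List Int × (List (Int × Int)) × List Int :=
  let st := idx_list.foldl
    (fun (st : PySem.Dict Int Int × List Int × List Int) idx =>
      let d := if st.1.contains idx then st.1 else st.1.insert idx st.1.size
      let nto := if st.1.contains idx then st.2.1 else st.2.1 ++ [idx]
      (d, nto, st.2.2 ++ [d.getD idx 0]))
    (PySem.Dict.empty, [], [])
  (st.2.2, st.1.items, st.2.1)

-- ===== PORT B =====
def make_contiguous_idx_alt (idx_list : List Int) : List Int × (List (Int × Int)) × List Int :=
  let new_to_idx_map := PySem.List.dedup idx_list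
  let idx_to_new_map : PySem.Dict Int Int :=
    PySem.Dict.ofList ((PySem.List.enumerate new_to_idx_map).map (fun p => (p.2, p.1)))
  -- idx_to_new_map[x]: the key is always present (x ∈ dedup idx_list), so getD never takes its default
  let new_idx_list := idx_list.map (fun x => idx_to_new_map.getD x 0)
  (new_idx_list, idx_to_new_map.items, new_to_idx_map)

-- ===== PRECONDITION & SPEC =====
def Spec_make_contiguous_idx (idx_list : List Int) (out : List Int × (List (Int × Int)) × List Int) : Prop := out = make_contiguous_idx_alt idx_list
instance (idx_list : List Int) (out : List Int × (List (Int × Int)) × List Int) : Decidable (Spec_make_contiguous_idx idx_list out) := by unfold Spec_make_contiguous_idx; infer_instance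

-- ===== CLAIM (what is proved, stated in full; the proofs are below) =====
def Claim_equal_make_contiguous_idx : Prop := ∀ (idx_list : List Int), Dom_make_contiguous_idx idx_list → Spec_make_contiguous_idx idx_list (make_contiguous_idx idx_list)

-- ===== LEMMAS AND PROOFS =====

-- the canonical pair list: (value, first-seen index) for each distinct value, in first-seen order
def mciPairs (l : List Int) : List (Int × Int) :=
  (PySem.List.enumerate (PySem.Set.ofList l)).map (fun p => (p.2, p.1))

-- the dict both programs end up with: (value, first-seen index), in first-seen order
def mciDict (l : List Int) : PySem.Dict Int Int := PySem.Dict.mk (mciPairs l)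

-- the contiguous index of x relative to l
def mciIdx (l : List Int) (x : Int) : Int := ((PySem.Set.ofList l).idxOf x : Int)

theorem mciPairs_map_fst (l : List Int) :
    (mciPairs l).map (·.1) = PySem.Set.ofList l := by
  simp [mciPairs, List.map_map, Function.comp_def, PySem.List.map_snd_enumerate]

theorem mciDict_keys (l : List Int) : (mciDict l).keys = PySem.Set.ofList l := by
  simpa [mciDict, PySem.Dict.keys_mk] using mciPairs_map_fst l

theorem mciDict_keys_nodup (l : List Int) : (mciDict l).keys.Nodup := by
  rw [mciDict_keys]; exact PySem.Set.nodup_ofList l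

theorem mem_mciPairs (l : List Int) {x : Int} (hx : x ∈ PySem.Set.ofList l) :
    (x, mciIdx l x) ∈ mciPairs l := by
  have hlt := List.idxOf_lt_length_of_mem hx
  have hget := List.getElem_idxOf hlt
  refine List.mem_map.mpr ⟨((List.idxOf x (PySem.Set.ofList l) : Int), x), ?_, rfl⟩
  rw [PySem.List.mem_enumerate_iff]
  exact ⟨List.idxOf x (PySem.Set.ofList l), hlt, by simp [hget]⟩

theorem mciDict_getD (l : List Int) {x : Int} (hx : x ∈ l) :
    (mciDict l).getD x 0 = mciIdx l x :=
  PySem.Dict.getD_of_mem_items (mciDict l)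
    (mem_mciPairs l ((PySem.Set.mem_ofList l x).mpr hx)) (mciDict_keys_nodup l) 0

theorem mciDict_contains_iff (l : List Int) (x : Int) :
    (mciDict l).contains x = true ↔ x ∈ l := by
  rw [PySem.Dict.contains_iff_mem_keys, mciDict_keys, PySem.Set.mem_ofList]

theorem mciDict_contains_true (l : List Int) {x : Int} (hx : x ∈ l) :
    (mciDict l).contains x = true := (mciDict_contains_iff l x).mpr hx

theorem mciDict_contains_false (l : List Int) {x : Int} (hx : x ∉ l) :
    (mciDict l).contains x = false := by
  cases h : (mciDict l).contains x
  · rfl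
  · exact absurd ((mciDict_contains_iff l x).mp h) hx

theorem ofList_append_not_mem (l : List Int) {x : Int} (hx : x ∉ l) :
    PySem.Set.ofList (l ++ [x]) = PySem.Set.ofList l ++ [x] := by
  rw [PySem.Set.ofList_append_singleton,
    PySem.Set.add_of_not_mem (by simpa [PySem.Set.mem_ofList] using hx)]

theorem ofList_append_mem (l : List Int) {x : Int} (hx : x ∈ l) :
    PySem.Set.ofList (l ++ [x]) = PySem.Set.ofList l := by
  rw [PySem.Set.ofList_append_singleton,
    PySem.Set.add_of_mem ((PySem.Set.mem_ofList l x).mpr hx)]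

theorem mciPairs_append_of_not_mem (l : List Int) {x : Int} (hx : x ∉ l) :
    mciPairs (l ++ [x]) = mciPairs l ++ [(x, ((PySem.Set.ofList l).length : Int))] := by
  simp [mciPairs, ofList_append_not_mem l hx, PySem.List.enumerate_append,
    PySem.List.enumerate_cons, PySem.List.enumerate_nil]

theorem mciIdx_append_of_mem (l : List Int) (x y : Int) (hy : y ∈ l) (hx : x ∉ l) :
    mciIdx (l ++ [x]) y = mciIdx l y := by
  have hy' : y ∈ PySem.Set.ofList l := (PySem.Set.mem_ofList l y).mpr hy
  simp [mciIdx, ofList_append_not_mem l hx, List.idxOf_append, hy']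

-- the loop invariant for A's fold
theorem mci_state (l : List Int) :
    l.foldl
      (fun (st : PySem.Dict Int Int × List Int × List Int) idx =>
        let d := if st.1.contains idx then st.1 else st.1.insert idx st.1.size
        let nto := if st.1.contains idx then st.2.1 else st.2.1 ++ [idx]
        (d, nto, st.2.2 ++ [d.getD idx 0]))
      (PySem.Dict.empty, [], [])
    = (mciDict l, PySem.Set.ofList l, l.map (mciIdx l)) := by
  induction l using List.reverseRecOn with
  | nil => rfl
  | append_singleton l x ih =>
    rw [List.foldl_append, ih]
    by_cases hx : x ∈ l
    · have hofl := ofList_append_mem l hx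
      have hd : mciDict (l ++ [x]) = mciDict l := by
        simp [mciDict, mciPairs, hofl]
      simp only [List.foldl_cons, List.foldl_nil, mciDict_contains_true l hx, if_true]
      refine Prod.ext hd.symm (Prod.ext (by simp [hofl]) ?_)
      show l.map (mciIdx l) ++ [(mciDict l).getD x 0] = (l ++ [x]).map (mciIdx (l ++ [x]))
      have hidx : ∀ y, mciIdx (l ++ [x]) y = mciIdx l y := fun y => by
        simp [mciIdx, hofl]
      rw [List.map_append]
      congr 1
      · exact (List.map_congr_left (fun y _ => hidx y)).symm
      · simp [mciDict_getD l hx, hidx x]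
    · have hcont := mciDict_contains_false l hx
      have hsize : (mciDict l).size = (PySem.Set.ofList l).length := by
        simp [mciDict, PySem.Dict.size, mciPairs, PySem.List.length_enumerate]
      have hitems : ((mciDict l).insert x ((mciDict l).size : Int)).items
          = mciPairs (l ++ [x]) := by
        rw [PySem.Dict.items_insert_of_not_contains _ _ hcont,
          mciPairs_append_of_not_mem l hx, hsize]
        rfl
      have hd : mciDict (l ++ [x]) = (mciDict l).insert x ((mciDict l).size : Int) := by
        apply PySem.Dict.ext
        simpa [mciDict] using hitems.symm
      have hnx : x ∉ PySem.Set.ofList l := by simpa [PySem.Set.mem_ofList] using hx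
      simp only [List.foldl_cons, List.foldl_nil, hcont, Bool.false_eq_true, if_false]
      refine Prod.ext (by simp [hd]) (Prod.ext (by simp [ofList_append_not_mem l hx]) ?_)
      show l.map (mciIdx l) ++ [((mciDict l).insert x ((mciDict l).size : Int)).getD x 0]
          = (l ++ [x]).map (mciIdx (l ++ [x]))
      rw [List.map_append]
      congr 1
      · exact (List.map_congr_left (fun y hy => mciIdx_append_of_mem l x y hy hx)).symm
      · have h1 : ((mciDict l).insert x ((mciDict l).size : Int)).getD x 0
            = ((PySem.Set.ofList l).length : Int) := by
          rw [PySem.Dict.getD_insert_self, hsize]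
        have h2 : mciIdx (l ++ [x]) x = ((PySem.Set.ofList l).length : Int) := by
          simp [mciIdx, ofList_append_not_mem l hx, List.idxOf_append, hnx]
        simp [h1, h2]

theorem alt_dict (l : List Int) :
    (PySem.Dict.ofList (mciPairs l) : PySem.Dict Int Int) = mciDict l := by
  apply PySem.Dict.ext
  have h := PySem.Dict.items_foldl_insert_fresh (mciPairs l) Prod.fst Prod.snd
    (PySem.Dict.empty : PySem.Dict Int Int)
    (fun a _ => PySem.Dict.contains_empty a.1)
    (by rw [show List.map Prod.fst (mciPairs l) = (mciPairs l).map (·.1) from rfl,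
          mciPairs_map_fst]; exact PySem.Set.nodup_ofList l)
  show (PySem.Dict.ofList (mciPairs l)).items = mciPairs l
  calc (PySem.Dict.ofList (mciPairs l)).items
      = (List.foldl (fun d a => d.insert a.1 a.2) (PySem.Dict.empty : PySem.Dict Int Int)
          (mciPairs l)).items := rfl
    _ = (PySem.Dict.empty : PySem.Dict Int Int).items
          ++ List.map (fun a => (a.1, a.2)) (mciPairs l) := h
    _ = mciPairs l := by
          simp [show (PySem.Dict.empty : PySem.Dict Int Int).items = [] from rfl]

-- ===== VERDICT (by name: the statement is the Claim_ definition above) =====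
theorem make_contiguous_idx_spec : Claim_equal_make_contiguous_idx := by
  intro l _
  unfold Spec_make_contiguous_idx make_contiguous_idx make_contiguous_idx_alt
  rw [mci_state l]
  simp only [PySem.List.dedup_eq_ofList]
  rw [show (PySem.List.enumerate (PySem.Set.ofList l)).map (fun p => (p.2, p.1))
      = mciPairs l from rfl, alt_dict l]
  refine Prod.ext ?_ (Prod.ext rfl rfl)
  exact List.map_congr_left (fun y hy => (mciDict_getD l hy).symm)
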